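-- pv_equiv track=rewrite | github.com/r-marcus/2048 | Final_2048.py | smushUp
-- ===== SOURCE A (Python) =====
-- def smushUp(masterList): #Move all non 0 values to the top of the 2D list
--     for row in range(len(masterList)):
--         nextFilled = 0
--         for col in range(len(masterList[0])):
--             if masterList[row][col] != 0:
--                 masterList[row][nextFilled] = masterList[row][col]
--                 if col != nextFilled and col != 0:
--                     masterList[row][col] = 0
--                 nextFilled += 1
--
--     return masterList
-- ===== SOURCE B (Python) =====
-- def smushUp(masterList):  # collect each row's non-zeros, then pad with zeros (slice-assign in place)
--     if masterList:
--         w = len(masterList[0])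
--         for row in masterList:
--             nz = [v for v in row[:w] if v != 0]
--             row[:w] = nz + [0] * (w - len(nz))
--     return masterList
-- ===== Notes on version B (the rewrite author's own statement) =====
-- stated objective: simpler
-- what changed: Replaces the two-pointer write-and-conditional-zero compaction of each row with a collect-nonzeros-then-pad-with-zeros slice assignment (same in-place row mutation).
import Mathlib
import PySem

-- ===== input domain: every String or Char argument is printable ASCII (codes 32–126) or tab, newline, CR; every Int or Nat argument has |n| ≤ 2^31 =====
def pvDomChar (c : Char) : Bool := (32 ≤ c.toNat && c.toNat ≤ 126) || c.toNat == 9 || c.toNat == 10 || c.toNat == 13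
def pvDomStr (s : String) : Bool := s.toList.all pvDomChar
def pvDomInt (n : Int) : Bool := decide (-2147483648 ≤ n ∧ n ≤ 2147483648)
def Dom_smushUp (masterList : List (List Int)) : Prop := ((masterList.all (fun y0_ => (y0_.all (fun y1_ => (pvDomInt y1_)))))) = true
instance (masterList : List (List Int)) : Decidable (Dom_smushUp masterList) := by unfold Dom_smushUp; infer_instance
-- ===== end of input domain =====

-- B replaces A's two-pointer write-and-zero row compaction by collect-nonzeros-then-pad
-- (objective: simpler); both Pythons mutate the row lists in place, the proof is about the
-- returned value.

-- ===== PORT A =====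
-- inner loop body of A: state (row, nextFilled); the two assignments become List.set
def pvStepA (s : List Int × Nat) (col : Nat) : List Int × Nat :=
  if s.1.getD col 0 ≠ 0 then
    ((if col ≠ s.2 ∧ col ≠ 0 then (s.1.set s.2 (s.1.getD col 0)).set col 0
      else s.1.set s.2 (s.1.getD col 0)), s.2 + 1)
  else s

def smushUp (masterList : List (List Int)) : List (List Int) :=
  (List.range masterList.length).foldl
    (fun m row =>
      m.set row ((List.range (m.headD []).length).foldl pvStepA (m.getD row [], 0)).1)
    masterList

-- ===== PORT B =====
def smushUp_alt (masterList : List (List Int)) : List (List Int) :=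
  match masterList with
  | [] => masterList
  | first :: _ =>
    masterList.map (fun row =>
      (((row.take first.length).filter (fun v => v ≠ 0)) ++
        List.replicate (first.length - ((row.take first.length).filter (fun v => v ≠ 0)).length) 0) ++
      row.drop first.length)

-- ===== PRECONDITION & SPEC =====
-- Pre_ excludes exactly the ragged grids on which A raises IndexError: some row is
-- shorter than the first row (A indexes every row up to len(masterList[0])).
def Pre_smushUp (masterList : List (List Int)) : Prop :=
  ∀ r ∈ masterList, (masterList.headD []).length ≤ r.length
instance (masterList : List (List Int)) : Decidable (Pre_smushUp masterList) := by
  unfold Pre_smushUp; infer_instance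

def pvWitness_smushUp : List (List Int) := [[2, 0, 2, 4], [0, 0, 4, 0]]

def Spec_smushUp (masterList : List (List Int)) (out : List (List Int)) : Prop := out = smushUp_alt masterList
instance (masterList : List (List Int)) (out : List (List Int)) : Decidable (Spec_smushUp masterList out) := by unfold Spec_smushUp; infer_instance

-- ===== CLAIM (what is proved, stated in full; the proofs are below) =====
def Claim_equal_smushUp : Prop := ∀ (masterList : List (List Int)), Dom_smushUp masterList → Pre_smushUp masterList → Spec_smushUp masterList (smushUp masterList)

-- ===== LEMMAS AND PROOFS =====

lemma set_at_join (l1 l2 : List Int) (i : Nat) (v : Int) (h : l1.length ≤ i) :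
    (l1 ++ l2).set i v = l1 ++ l2.set (i - l1.length) v := by
  rw [List.set_append]
  split
  · omega
  · rfl

lemma pv_inner (r : List Int) : ∀ (k : Nat), k ≤ r.length →
    (List.range k).foldl pvStepA (r, 0) =
      (((r.take k).filter (fun v => v ≠ 0)) ++
         (List.replicate (k - ((r.take k).filter (fun v => v ≠ 0)).length) 0 ++ r.drop k),
       ((r.take k).filter (fun v => v ≠ 0)).length) := by
  intro k
  induction k with
  | zero => intro _; simp
  | succ k ih =>
    intro hk
    have hklt : k < r.length := hk
    rw [List.range_succ, List.foldl_append, ih (by omega)]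
    simp only [List.foldl_cons, List.foldl_nil]
    set nz := (r.take k).filter (fun v => v ≠ 0) with hnzdef
    have hnf : nz.length ≤ k := by
      calc nz.length ≤ (r.take k).length := List.length_filter_le _ _
        _ ≤ k := by simp
    have hdrop : r.drop k = r[k] :: r.drop (k + 1) := List.drop_eq_getElem_cons hklt
    have htake : r.take (k + 1) = r.take k ++ [r[k]] := by
      rw [List.take_succ, List.getElem?_eq_getElem hklt]; rfl
    have hget : (nz ++ (List.replicate (k - nz.length) 0 ++ r.drop k)).getD k 0 = r[k] := by
      rw [List.getD_eq_getElem?_getD,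
          List.getElem?_append_right (by omega : nz.length ≤ k),
          List.getElem?_append_right (by simpa using by omega)]
      rw [hdrop]
      have h0i : k - nz.length - (List.replicate (k - nz.length) (0:Int)).length = 0 := by
        simp
      rw [h0i]
      rfl
    by_cases h0 : r[k] = 0
    · have hstep : pvStepA (nz ++ (List.replicate (k - nz.length) 0 ++ r.drop k), nz.length) k
           = (nz ++ (List.replicate (k - nz.length) 0 ++ r.drop k), nz.length) := by
        simp only [pvStepA, hget, h0]
        simp
      rw [hstep]
      have hfilt : (r.take (k+1)).filter (fun v => v ≠ 0) = nz := by
        rw [htake, List.filter_append, hnzdef]; simp [h0]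
      rw [hfilt]
      have h1 : k + 1 - nz.length = (k - nz.length) + 1 := by omega
      rw [h1, List.replicate_succ', hdrop, h0]
      simp
    · have hfilt : (r.take (k+1)).filter (fun v => v ≠ 0) = nz ++ [r[k]] := by
        rw [htake, List.filter_append, hnzdef]; simp [h0]
      rw [hfilt]
      have hlenf : (nz ++ [r[k]]).length = nz.length + 1 := by simp
      rw [hlenf]
      by_cases hkn : k = nz.length
      · -- first free slot: set is the identity, no zeroing
        have hrep : List.replicate (k - nz.length) (0:Int) = [] := by
          rw [hkn]; simp
        have hset : (nz ++ (List.replicate (k - nz.length) 0 ++ r.drop k)).set nz.length r[k]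
            = nz ++ (List.replicate (k - nz.length) 0 ++ r.drop k) := by
          rw [hrep]
          simp only [List.nil_append]
          rw [set_at_join nz _ nz.length r[k] (le_refl _)]
          rw [Nat.sub_self, hdrop, List.set_cons_zero]
        have hstep : pvStepA (nz ++ (List.replicate (k - nz.length) 0 ++ r.drop k), nz.length) k
             = (nz ++ (List.replicate (k - nz.length) 0 ++ r.drop k), nz.length + 1) := by
          simp only [pvStepA]
          rw [hget, if_pos h0, if_neg (fun h => h.1 hkn), hset]
        rw [hstep, hrep]
        have : k + 1 - (nz.length + 1) = 0 := by omega
        rw [this, hdrop]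
        simp
      · -- a gap exists: value moves down, source cell is zeroed
        have hnfk : nz.length < k := by omega
        obtain ⟨m, hm⟩ : ∃ m, k - nz.length = m + 1 := ⟨k - nz.length - 1, by omega⟩
        have hrep : List.replicate (k - nz.length) (0:Int) = 0 :: List.replicate m 0 := by
          rw [hm]; rfl
        have hset1 : (nz ++ (List.replicate (k - nz.length) 0 ++ r.drop k)).set nz.length r[k]
            = nz ++ (r[k] :: (List.replicate m 0 ++ r.drop k)) := by
          rw [set_at_join nz _ nz.length r[k] (le_refl _), hrep]
          rw [Nat.sub_self, List.cons_append, List.set_cons_zero]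
        have hset2 : (nz ++ (r[k] :: (List.replicate m 0 ++ r.drop k))).set k 0
            = nz ++ (r[k] :: (List.replicate m 0 ++ (0 :: r.drop (k+1)))) := by
          rw [set_at_join nz _ k 0 (by omega)]
          have : k - nz.length = m + 1 := hm
          rw [this]
          simp only [List.set_cons_succ]
          rw [set_at_join (List.replicate m 0) _ m 0 (by simp)]
          have hm0 : m - (List.replicate m (0:Int)).length = 0 := by simp
          rw [hm0, hdrop, List.set_cons_zero]
        have hstep : pvStepA (nz ++ (List.replicate (k - nz.length) 0 ++ r.drop k), nz.length) k
             = (nz ++ (r[k] :: (List.replicate m 0 ++ (0 :: r.drop (k+1)))), nz.length + 1) := by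
          have hc : (k ≠ nz.length ∧ k ≠ 0) := ⟨hkn, by omega⟩
          simp only [pvStepA]
          rw [hget, if_pos h0, if_pos hc, hset1, hset2]
        rw [hstep]
        have h1 : k + 1 - (nz.length + 1) = m + 1 := by omega
        rw [h1, List.replicate_succ']
        simp

def pvG (w : Nat) (r : List Int) : List Int :=
  ((r.take w).filter (fun v => v ≠ 0)) ++
    (List.replicate (w - ((r.take w).filter (fun v => v ≠ 0)).length) 0 ++ r.drop w)

lemma pvG_length (w : Nat) (r : List Int) (hw : w ≤ r.length) :
    (pvG w r).length = r.length := by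
  have h1 : ((r.take w).filter (fun v => v ≠ 0)).length ≤ w := by
    calc ((r.take w).filter (fun v => v ≠ 0)).length ≤ (r.take w).length := List.length_filter_le _ _
      _ ≤ w := by simp
  unfold pvG
  simp only [List.length_append, List.length_replicate, List.length_drop]
  omega

lemma set_at_join' {α : Type} (l1 l2 : List α) (i : Nat) (v : α) (h : l1.length ≤ i) :
    (l1 ++ l2).set i v = l1 ++ l2.set (i - l1.length) v := by
  rw [List.set_append]
  split
  · omega
  · rfl

lemma pv_outer (mL : List (List Int))
    (hpre : ∀ r ∈ mL, (mL.headD []).length ≤ r.length) :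
    ∀ k, k ≤ mL.length →
      (List.range k).foldl
        (fun m row => m.set row ((List.range (m.headD []).length).foldl pvStepA (m.getD row [], 0)).1)
        mL
      = (mL.take k).map (pvG (mL.headD []).length) ++ mL.drop k := by
  intro k
  induction k with
  | zero => intro _; simp
  | succ k ih =>
    intro hk
    have hklt : k < mL.length := hk
    rw [List.range_succ, List.foldl_append, ih (by omega)]
    simp only [List.foldl_cons, List.foldl_nil]
    have hmem : mL[k] ∈ mL := List.getElem_mem hklt
    have hlenpre : ((mL.take k).map (pvG (mL.headD []).length)).length = k := by
      simp; omega
    have hdropm : mL.drop k = mL[k] :: mL.drop (k + 1) := List.drop_eq_getElem_cons hklt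
    have hhead : (((mL.take k).map (pvG (mL.headD []).length) ++ mL.drop k).headD []).length
        = (mL.headD []).length := by
      cases mL with
      | nil => simp at hklt
      | cons a t =>
        cases k with
        | zero => simp
        | succ s =>
          simp only [List.take_succ_cons, List.map_cons, List.cons_append, List.headD_cons]
          exact pvG_length _ _ (hpre a List.mem_cons_self)
    have hgetd : (((mL.take k).map (pvG (mL.headD []).length) ++ mL.drop k).getD k []) = mL[k] := by
      rw [List.getD_eq_getElem?_getD, List.getElem?_append_right (by omega)]
      rw [hlenpre, Nat.sub_self, hdropm]
      rfl
    rw [hhead, hgetd]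
    have hinner := pv_inner (mL[k]) (mL.headD []).length (hpre _ hmem)
    have hfst : ((List.range (mL.headD []).length).foldl pvStepA (mL[k], 0)).1
        = pvG (mL.headD []).length mL[k] := by
      rw [hinner]; rfl
    rw [hfst]
    rw [set_at_join' _ _ k _ (by omega), hlenpre, Nat.sub_self, hdropm, List.set_cons_zero]
    rw [List.take_succ, List.getElem?_eq_getElem hklt, Option.toList_some, List.map_append,
        List.append_assoc, List.map_singleton, List.singleton_append]

-- ===== VERDICT (by name: the statement is the Claim_ definition above) =====
theorem smushUp_spec : Claim_equal_smushUp := by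
  intro m _ hpre
  unfold Spec_smushUp smushUp
  rw [pv_outer m hpre m.length (le_refl _), List.take_length, List.drop_length, List.append_nil]
  cases m with
  | nil => rfl
  | cons a t =>
    simp only [List.headD_cons, smushUp_alt]
    refine List.map_congr_left ?_
    intro r _
    simp only [pvG, List.append_assoc]
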